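-- pv_equiv track=rewrite | github.com/YMUNick/marksix | generate_data.py | compute_hot_cold
-- ===== SOURCE A (Python) =====
-- from collections import Counter
--
-- def compute_hot_cold(draws, recent_n=20):
--     """Hot/cold numbers based on recent N draws."""
--     recent = draws[-recent_n:]
--     freq = Counter()
--     for d in recent:
--         for n in d['numbers']:
--             freq[n] += 1
--
--     result = []
--     for n in range(1, 50):
--         count = freq.get(n, 0)
--         result.append({"number": n, "count": count})
--
--     result.sort(key=lambda x: x['count'], reverse=True)
--     return result
-- ===== SOURCE B (Python) =====
-- def compute_hot_cold(draws, recent_n=20):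
--     """Hot/cold numbers based on recent N draws: per-number counting via list.count,
--     output assembled by a descending sweep over count values (no Counter, no sort)."""
--     recent = draws[-recent_n:]
--     counts = [(n, sum(d['numbers'].count(n) for d in recent)) for n in range(1, 50)]
--     top = max(k for _, k in counts)
--     result = []
--     for c in range(top, -1, -1):
--         for n, k in counts:
--             if k == c:
--                 result.append({"number": n, "count": c})
--     return result
-- ===== Notes on version B (the rewrite author's own statement) =====
-- stated objective: alternative
-- what changed: Replaces the Counter-plus-stable-list.sort pipeline by direct per-number counting with list.count and a counting-sort-style output sweep: for each count value from the observed maximum down to 0, the numbers 1..49 with that count are appended in ascending order, which reproduces the stable sort's descending-count, ascending-number order exactly.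
import Mathlib
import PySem

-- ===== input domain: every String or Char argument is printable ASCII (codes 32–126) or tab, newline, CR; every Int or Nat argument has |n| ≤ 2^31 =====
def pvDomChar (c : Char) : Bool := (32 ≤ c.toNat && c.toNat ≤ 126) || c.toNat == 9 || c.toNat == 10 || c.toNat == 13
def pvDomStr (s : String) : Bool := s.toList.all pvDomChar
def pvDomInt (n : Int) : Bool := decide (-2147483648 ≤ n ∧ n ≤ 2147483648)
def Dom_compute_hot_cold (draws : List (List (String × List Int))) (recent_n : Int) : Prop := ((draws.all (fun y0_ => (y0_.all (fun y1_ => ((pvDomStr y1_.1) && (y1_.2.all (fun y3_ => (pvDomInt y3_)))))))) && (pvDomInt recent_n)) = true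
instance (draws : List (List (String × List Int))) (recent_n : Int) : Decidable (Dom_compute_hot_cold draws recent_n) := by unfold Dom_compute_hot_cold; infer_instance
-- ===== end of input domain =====

-- B drops the Counter and the stable list.sort: it counts each number 1..49 directly with
-- list.count and emits records by sweeping count values from the maximum down to 0
-- (ascending number within each count), proved to return the identical list.

-- ===== PORT A =====
-- A's sort key x['count']: every record built by A carries the key "count", so the total
-- getD form is exact on the lists A sorts.
def compute_hot_cold (draws : List (List (String × List Int))) (recent_n : Int) : List (List (String × Int)) :=
  let recent := PySem.List.slice draws (some (-recent_n)) none
  -- d['numbers'] raises KeyError when the key is missing: Pre_ excludes that, so getD is exact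
  let freq : PySem.Dict Int Int := recent.foldl
    (fun f d => ((PySem.Dict.mk d).getD "numbers" []).foldl (fun f n => f.modify n 0 (· + 1)) f)
    PySem.Dict.empty
  let result := (PySem.List.pyRange 1 50 1).map
    (fun n => [("number", n), ("count", freq.getD n 0)])
  PySem.List.sorted result (fun x => (PySem.Dict.mk x).getD "count" 0) true

-- ===== PORT B =====
def compute_hot_cold_alt (draws : List (List (String × List Int))) (recent_n : Int) : List (List (String × Int)) :=
  let recent := PySem.List.slice draws (some (-recent_n)) none
  let counts : List (Int × Int) := (PySem.List.pyRange 1 50 1).map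
    (fun n => (n, (recent.map (fun d => ((((PySem.Dict.mk d).getD "numbers" []).count n : Nat) : Int))).sum))
  match PySem.List.max? (counts.map (·.2)) (fun x => x) with
  | none => []   -- unreachable totality guard: counts always has 49 entries (max() raises only on empty)
  | some top =>
    (PySem.List.pyRange top (-1) (-1)).foldl
      (fun result c => counts.foldl
        (fun result p => if p.2 == c then result ++ [[("number", p.1), ("count", c)]] else result)
        result) []

-- ===== PRECONDITION & SPEC =====
-- Pre_ excludes exactly the inputs where A raises KeyError: a draw among the recent
-- recent_n ones without a "numbers" key (B raises there too).
def Pre_compute_hot_cold (draws : List (List (String × List Int))) (recent_n : Int) : Prop :=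
  ∀ d ∈ PySem.List.slice draws (some (-recent_n)) none, "numbers" ∈ d.map Prod.fst
instance (draws : List (List (String × List Int))) (recent_n : Int) : Decidable (Pre_compute_hot_cold draws recent_n) := by unfold Pre_compute_hot_cold; infer_instance

def pvWitness_compute_hot_cold : (List (List (String × List Int))) × Int :=
  ([[("numbers", [3, 7, 7, 49])], [("numbers", [7, 1])]], 20)

def Spec_compute_hot_cold (draws : List (List (String × List Int))) (recent_n : Int) (out : List (List (String × Int))) : Prop := out = compute_hot_cold_alt draws recent_n
instance (draws : List (List (String × List Int))) (recent_n : Int) (out : List (List (String × Int))) : Decidable (Spec_compute_hot_cold draws recent_n out) := by unfold Spec_compute_hot_cold; infer_instance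

-- ===== CLAIM (what is proved, stated in full; the proofs are below) =====
def Claim_equal_compute_hot_cold : Prop := ∀ (draws : List (List (String × List Int))) (recent_n : Int), Dom_compute_hot_cold draws recent_n → Pre_compute_hot_cold draws recent_n → Spec_compute_hot_cold draws recent_n (compute_hot_cold draws recent_n)

-- ===== LEMMAS AND PROOFS =====

-- record field accessors (proof-side names for the lambdas the ports use)
def chcKey (x : List (String × Int)) : Int := (PySem.Dict.mk x).getD "count" 0
def chcNum (x : List (String × Int)) : Int := (PySem.Dict.mk x).getD "number" 0
-- the strict order that characterises A's stable reverse sort of a number-ascending list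
def chcR (x y : List (String × Int)) : Prop :=
  chcKey y < chcKey x ∨ (chcKey x = chcKey y ∧ chcNum x < chcNum y)

def chcItem (g : Int → Int) (n : Int) : List (String × Int) := [("number", n), ("count", g n)]
def chcItems (g : Int → Int) : List (List (String × Int)) :=
  (PySem.List.pyRange 1 50 1).map (chcItem g)

@[simp] lemma chcKey_item (g : Int → Int) (n : Int) : chcKey (chcItem g n) = g n := by
  simp [chcKey, chcItem, PySem.Dict.getD, PySem.Dict.get?_mk_cons]

@[simp] lemma chcNum_item (g : Int → Int) (n : Int) : chcNum (chcItem g n) = n := by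
  simp [chcNum, chcItem, PySem.Dict.getD, PySem.Dict.get?_mk_cons]

lemma chcR_trans {a b c : List (String × Int)} (h1 : chcR a b) (h2 : chcR b c) : chcR a c := by
  unfold chcR at *; omega

lemma chcR_asymm {a b : List (String × Int)} (h1 : chcR a b) (h2 : chcR b a) : False := by
  unfold chcR at *; omega

-- insertBy keeps pairwise order when the new element compares coherently with every member
lemma pairwise_insertBy_of {α : Type} (R : α → α → Prop)
    (htrans : ∀ {a b c : α}, R a b → R b c → R a c)
    (before : α → α → Bool) (x : α) (ys : List α)
    (h1 : ys.Pairwise R)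
    (h2 : ∀ y ∈ ys, (before x y = true → R x y) ∧ (before x y = false → R y x)) :
    (PySem.List.insertBy before x ys).Pairwise R := by
  induction ys with
  | nil => simp [PySem.List.insertBy]
  | cons y ys ih =>
    by_cases hb : before x y = true
    · have hxy : R x y := (h2 y (by simp)).1 hb
      simp only [PySem.List.insertBy, hb, if_true]
      refine List.Pairwise.cons ?_ h1
      intro z hz
      rcases List.mem_cons.1 hz with rfl | hz
      · exact hxy
      · exact htrans hxy (List.rel_of_pairwise_cons h1 hz)
    · simp only [PySem.List.insertBy, hb]
      refine List.Pairwise.cons ?_ (ih h1.tail (fun y' hy' => h2 y' (by simp [hy'])))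
      intro z hz
      rcases (PySem.List.mem_insertBy before x z ys).1 hz with rfl | hz
      · exact (h2 y (by simp)).2 (by simpa using hb)
      · exact List.rel_of_pairwise_cons h1 hz

-- the insertion-sort loop of sorted … true, run on a number-ascending list, is chcR-pairwise
lemma foldl_insertBy_pairwise :
    ∀ (xs acc : List (List (String × Int))),
      acc.Pairwise chcR →
      (∀ x ∈ xs, ∀ y ∈ acc, chcNum y < chcNum x) →
      xs.Pairwise (fun a b => chcNum a < chcNum b) →
      (xs.foldl (fun acc x =>
        PySem.List.insertBy (fun a b => decide (chcKey b < chcKey a)) x acc) acc).Pairwise chcR := by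
  intro xs
  induction xs with
  | nil => intro acc hacc _ _; simpa using hacc
  | cons x xs ih =>
    intro acc hacc hx hxs
    simp only [List.foldl_cons]
    apply ih
    · apply pairwise_insertBy_of chcR chcR_trans
      · exact hacc
      · intro y hy
        constructor
        · intro hb
          exact Or.inl (of_decide_eq_true hb)
        · intro hb
          have hk : chcKey x ≤ chcKey y := by
            have := of_decide_eq_false hb; omega
          have hn : chcNum y < chcNum x := hx x (by simp) y hy
          rcases lt_or_eq_of_le hk with h | h
          · exact Or.inl h
          · exact Or.inr ⟨h.symm, hn⟩
    · intro x' hx' y hy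
      rcases (PySem.List.mem_insertBy _ x y acc).1 hy with rfl | hy
      · exact List.rel_of_pairwise_cons hxs hx'
      · exact hx x' (by simp [hx']) y hy
    · exact hxs.tail

lemma sorted_rev_pairwise_chcR (xs : List (List (String × Int)))
    (hxs : xs.Pairwise (fun a b => chcNum a < chcNum b)) :
    (PySem.List.sorted xs chcKey true).Pairwise chcR := by
  rw [PySem.List.sorted_rev_eq_foldl_insertBy]
  exact foldl_insertBy_pairwise xs [] (by simp) (by simp) hxs

-- concatenating, over distinct covering key values, the filters of a list is a permutation of it
lemma flatMap_filter_perm {α : Type} (k : α → Int) :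
    ∀ (cs : List Int) (xs : List α), cs.Nodup → (∀ x ∈ xs, k x ∈ cs) →
      (cs.flatMap (fun c => xs.filter (fun x => k x == c))).Perm xs := by
  intro cs
  induction cs with
  | nil =>
    intro xs _ hcov
    cases xs with
    | nil => simp
    | cons x xs => exact absurd (hcov x (by simp)) (by simp)
  | cons c cs ih =>
    intro xs hnd hcov
    have hnotc : c ∉ cs := (List.nodup_cons.1 hnd).1
    have hrw : ∀ c' ∈ cs, xs.filter (fun x => k x == c')
        = (xs.filter (fun x => !(k x == c))).filter (fun x => k x == c') := by
      intro c' hc'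
      rw [List.filter_filter]
      apply List.filter_congr
      intro x _
      by_cases h : k x = c'
      · have : c' ≠ c := fun he => hnotc (he ▸ hc')
        simp [h, this]
      · simp [h]
    have hstep : (cs.flatMap (fun c' => xs.filter (fun x => k x == c')))
        = cs.flatMap (fun c' => (xs.filter (fun x => !(k x == c))).filter (fun x => k x == c')) := by
      simp only [List.flatMap_def]
      exact congrArg List.flatten (List.map_congr_left hrw)
    have hcov' : ∀ x ∈ xs.filter (fun x => !(k x == c)), k x ∈ cs := by
      intro x hx
      have hm := List.of_mem_filter hx
      have := hcov x (List.mem_of_mem_filter hx)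
      simp only [List.mem_cons] at this
      rcases this with h | h
      · simp [h] at hm
      · exact h
    rw [List.flatMap_cons, hstep]
    exact (List.Perm.append_left _ (ih _ (List.nodup_cons.1 hnd).2 hcov')).trans
      (List.filter_append_perm _ xs)

-- the central identity: the stable reverse sort of the 49 records equals the concatenation of
-- the per-count filters over any strictly decreasing covering list of count values
lemma sorted_eq_flatMap_desc (g : Int → Int) (cs : List Int)
    (hcsnd : cs.Nodup) (hcsdec : cs.Pairwise (fun a b => b < a))
    (hcov : ∀ x ∈ chcItems g, chcKey x ∈ cs) :
    PySem.List.sorted (chcItems g) chcKey true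
      = cs.flatMap (fun c => (chcItems g).filter (fun x => chcKey x == c)) := by
  have hnum : (chcItems g).Pairwise (fun a b => chcNum a < chcNum b) := by
    unfold chcItems
    exact List.Pairwise.map _ (fun a b h => by simpa using h)
      (PySem.List.pairwise_lt_pyRange_one 1 50)
  have hA : (PySem.List.sorted (chcItems g) chcKey true).Pairwise chcR :=
    sorted_rev_pairwise_chcR _ hnum
  have hB : (cs.flatMap (fun c => (chcItems g).filter (fun x => chcKey x == c))).Pairwise chcR := by
    rw [List.pairwise_flatMap]
    constructor
    · intro c _
      rw [List.pairwise_filter]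
      exact hnum.imp (fun {a b} h => fun ha hb =>
        Or.inr ⟨by rw [eq_of_beq ha, eq_of_beq hb], h⟩)
    · exact hcsdec.imp (fun {c₁ c₂} h => fun x hx y hy => by
        have hx' := List.of_mem_filter hx
        have hy' := List.of_mem_filter hy
        exact Or.inl (by rw [eq_of_beq hx', eq_of_beq hy']; exact h))
  have hperm : (PySem.List.sorted (chcItems g) chcKey true).Perm
      (cs.flatMap (fun c => (chcItems g).filter (fun x => chcKey x == c))) :=
    (PySem.List.sorted_perm _ _ _).trans (flatMap_filter_perm chcKey cs _ hcsnd hcov).symm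
  exact List.Perm.eq_of_pairwise
    (fun a b _ _ h1 h2 => (chcR_asymm h1 h2).elim) hA hB hperm

-- A's Counter loop, looked up at any value, is B's per-value sum of list.count
lemma freqA_getD (recent : List (List (String × List Int))) (v : Int) :
    ∀ (d0 : PySem.Dict Int Int),
    (recent.foldl
      (fun f d => ((PySem.Dict.mk d).getD "numbers" []).foldl (fun f n => f.modify n 0 (· + 1)) f)
      d0).getD v 0
    = d0.getD v 0
      + (recent.map (fun d => ((((PySem.Dict.mk d).getD "numbers" []).count v : Nat) : Int))).sum := by
  induction recent with
  | nil => intro d0; simp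
  | cons d recent ih =>
    intro d0
    simp only [List.foldl_cons, List.map_cons, List.sum_cons]
    rw [ih, PySem.Dict.getD_foldl_modify_add_one]
    ring

-- proof-side name for B's per-number count
def chcG (recent : List (List (String × List Int))) (n : Int) : Int :=
  (recent.map (fun d => ((((PySem.Dict.mk d).getD "numbers" []).count n : Nat) : Int))).sum

lemma ports_eq (recent : List (List (String × List Int))) :
    PySem.List.sorted
      ((PySem.List.pyRange 1 50 1).map
        (fun n => [("number", n),
          ("count", (recent.foldl
            (fun f d => ((PySem.Dict.mk d).getD "numbers" []).foldl (fun f n => f.modify n 0 (· + 1)) f)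
            PySem.Dict.empty).getD n 0)]))
      (fun x => (PySem.Dict.mk x).getD "count" 0) true
    = (match PySem.List.max?
          ((((PySem.List.pyRange 1 50 1).map (fun n => (n, chcG recent n))).map (·.2))) (fun x => x) with
      | none => []
      | some top =>
        (PySem.List.pyRange top (-1) (-1)).foldl
          (fun result c => ((PySem.List.pyRange 1 50 1).map (fun n => (n, chcG recent n))).foldl
            (fun result p => if p.2 == c then result ++ [[("number", p.1), ("count", c)]] else result)
            result) []) := by
  have hgnn : ∀ n, 0 ≤ chcG recent n := by
    intro n
    apply List.sum_nonneg
    intro x hx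
    rcases List.mem_map.1 hx with ⟨d, _, rfl⟩
    exact Int.natCast_nonneg _
  have hres : (PySem.List.pyRange 1 50 1).map
      (fun n => [("number", n),
        ("count", (recent.foldl
          (fun f d => ((PySem.Dict.mk d).getD "numbers" []).foldl (fun f n => f.modify n 0 (· + 1)) f)
          PySem.Dict.empty).getD n 0)])
      = chcItems (chcG recent) := by
    apply List.map_congr_left
    intro n _
    simp only [chcItem]
    rw [freqA_getD recent n PySem.Dict.empty]
    simp [chcG]
  rw [hres]
  have hcounts : (((PySem.List.pyRange 1 50 1).map (fun n => (n, chcG recent n))).map (·.2))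
      = (PySem.List.pyRange 1 50 1).map (chcG recent) := by
    rw [List.map_map]; rfl
  rcases htop : PySem.List.max?
      ((((PySem.List.pyRange 1 50 1).map (fun n => (n, chcG recent n))).map (·.2))) (fun x => x)
      with _ | top
  · exfalso
    have h := (PySem.List.max?_eq_none_iff _ _).1 htop
    rw [hcounts] at h
    have h2 : (PySem.List.pyRange 1 50 1) = [] := List.map_eq_nil_iff.1 h
    rw [PySem.List.pyRange_one_cons (by norm_num)] at h2
    exact List.cons_ne_nil _ _ h2
  · simp only [htop]
    have hle : ∀ n ∈ PySem.List.pyRange 1 50 1, chcG recent n ≤ top := by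
      intro n hn
      have := PySem.List.max?_isMax htop (chcG recent n)
        (by rw [hcounts]; exact List.mem_map.2 ⟨n, hn, rfl⟩)
      simpa using this
    have h0top : 0 ≤ top := le_trans (hgnn 1)
      (hle 1 (by rw [PySem.List.pyRange_one_cons (by norm_num)]; simp))
    have hcsdec : (PySem.List.pyRange top (-1) (-1)).Pairwise (fun a b => b < a) := by
      rw [PySem.List.pyRange_neg_one_eq_reverse, List.pairwise_reverse]
      simpa using PySem.List.pairwise_lt_pyRange_one 0 (top + 1)
    have hcsnd : (PySem.List.pyRange top (-1) (-1)).Nodup :=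
      hcsdec.imp (fun h => (ne_of_lt h).symm)
    have hcov : ∀ x ∈ chcItems (chcG recent), chcKey x ∈ PySem.List.pyRange top (-1) (-1) := by
      intro x hx
      rcases List.mem_map.1 hx with ⟨n, hn, rfl⟩
      rw [PySem.List.mem_pyRange_neg_one]
      have := hgnn n
      have := hle n hn
      simp only [chcKey_item]
      omega
    have hinner : ∀ (acc : List (List (String × Int))) (c : Int),
        ((PySem.List.pyRange 1 50 1).map (fun n => (n, chcG recent n))).foldl
          (fun result p => if p.2 == c then result ++ [[("number", p.1), ("count", c)]] else result) acc
        = acc ++ (chcItems (chcG recent)).filter (fun x => chcKey x == c) := by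
      intro acc c
      rw [PySem.List.foldl_append_if (p := fun p : Int × Int => p.2 == c)
        (f := fun p : Int × Int => [("number", p.1), ("count", c)])]
      congr 1
      rw [List.filter_map, chcItems, List.filter_map]
      have hf1 : ((fun p : Int × Int => p.2 == c) ∘ fun n => (n, chcG recent n))
          = fun n => chcG recent n == c := rfl
      have hf2 : (PySem.List.pyRange 1 50 1).filter ((fun x => chcKey x == c) ∘ chcItem (chcG recent))
          = (PySem.List.pyRange 1 50 1).filter (fun n => chcG recent n == c) := by
        apply List.filter_congr
        intro n _
        simp [Function.comp]
      rw [hf1, hf2, List.map_map]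
      apply List.map_congr_left
      intro n hn
      have hc : chcG recent n = c := by
        have := List.of_mem_filter hn; simpa using this
      simp [Function.comp, chcItem, hc]
    have hcong := PySem.List.foldl_congr_mem
      (l := PySem.List.pyRange top (-1) (-1))
      (init := ([] : List (List (String × Int))))
      (f := fun result c => ((PySem.List.pyRange 1 50 1).map (fun n => (n, chcG recent n))).foldl
        (fun result p => if p.2 == c then result ++ [[("number", p.1), ("count", c)]] else result)
        result)
      (g := fun result c => result ++ (chcItems (chcG recent)).filter (fun x => chcKey x == c))
      (fun acc c _ => hinner acc c)
    rw [hcong, PySem.List.foldl_append_eq_flatMap, List.nil_append]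
    exact sorted_eq_flatMap_desc (chcG recent) _ hcsnd hcsdec hcov

-- ===== VERDICT (by name: the statement is the Claim_ definition above) =====
theorem compute_hot_cold_spec : Claim_equal_compute_hot_cold := by
  intro draws recent_n _ _
  show compute_hot_cold draws recent_n = compute_hot_cold_alt draws recent_n
  unfold compute_hot_cold compute_hot_cold_alt
  exact ports_eq (PySem.List.slice draws (some (-recent_n)) none)
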